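-- pv_equiv track=rewrite | github.com/Jeong-Siku/TIL | 프로그래머스/lv1/64061. 크레인 인형뽑기 게임/크레인 인형뽑기 게임.py | solution
-- ===== SOURCE A (Python) =====
-- from collections import defaultdict
--
-- def solution(board, moves):
--     dic = defaultdict(list)
--
--     for i in board:
--         for idx,j in enumerate(i):
--             if j==0:
--                 continue
--             else:
--                 dic[idx+1].append(j)
--     result = []
--     answer = 0
--     for i in moves:
--         if dic[i]:
--             result.append(dic[i].pop(0))
--         else:
--             continue
--         if len(result)>=2 and result[-1]==result[-2]:
--             result.pop()
--             result.pop()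
--             answer+=2
--     return answer
-- ===== SOURCE B (Python) =====
-- def solution(board, moves):
--     board2 = [row[:] for row in board]
--     basket = []
--     answer = 0
--     for m in moves:
--         c = m - 1
--         for row in board2:
--             if 0 <= c < len(row) and row[c] != 0:
--                 v = row[c]
--                 row[c] = 0
--                 if basket and basket[-1] == v:
--                     basket.pop()
--                     answer += 2
--                 else:
--                     basket.append(v)
--                 break
--     return answer
-- ===== Notes on version B (the rewrite author's own statement) =====
-- stated objective: simpler
-- what changed: Drops the precomputed per-column dict and the append-then-cancel basket: B works directly on a copy of the board, scanning top-down for the first non-zero cell of the requested column and zeroing it, and cancels against the basket top before pushing.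
import Mathlib
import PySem

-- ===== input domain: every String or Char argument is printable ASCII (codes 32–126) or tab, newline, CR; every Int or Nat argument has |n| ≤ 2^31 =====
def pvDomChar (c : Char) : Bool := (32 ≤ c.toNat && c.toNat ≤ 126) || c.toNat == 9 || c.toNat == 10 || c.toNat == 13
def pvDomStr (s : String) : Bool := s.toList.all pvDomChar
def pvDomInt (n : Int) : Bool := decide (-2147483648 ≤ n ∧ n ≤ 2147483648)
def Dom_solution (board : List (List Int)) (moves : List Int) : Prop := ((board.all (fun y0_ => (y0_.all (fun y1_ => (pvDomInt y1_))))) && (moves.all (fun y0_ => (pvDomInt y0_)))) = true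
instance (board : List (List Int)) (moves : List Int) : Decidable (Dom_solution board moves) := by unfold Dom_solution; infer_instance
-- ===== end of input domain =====

-- B replaces A's precomputed column dict by scanning a mutable copy of the board for each
-- move (simpler, no dict); the basket cancels against its top before pushing instead of
-- appending and then removing the equal pair.

-- ===== PORT A =====
-- inner "for idx,j in enumerate(i)" loop of A, appending non-zero cells to dic[idx+1]
def pvRowStep (dic : PySem.Dict Int (List Int)) (row : List Int) : PySem.Dict Int (List Int) :=
  (PySem.List.enumerate row).foldl
    (fun d p => if p.2 = 0 then d else d.insert (p.1 + 1) (d.getD (p.1 + 1) [] ++ [p.2])) dic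

-- body of A's "for i in moves" loop; state = (dic, result, answer); dic[i].pop(0) = head
def pvMoveStepA (st : PySem.Dict Int (List Int) × List Int × Int) (i : Int) :
    PySem.Dict Int (List Int) × List Int × Int :=
  match st.1.getD i [] with
  | [] => st
  | v :: rest =>
    let dic := st.1.insert i rest
    let result := st.2.1 ++ [v]
    if 2 ≤ result.length ∧ PySem.List.pyGet? result (-1) = PySem.List.pyGet? result (-2) then
      (dic, result.dropLast.dropLast, st.2.2 + 2)
    else (dic, result, st.2.2)

def solution (board : List (List Int)) (moves : List Int) : Int :=
  let dic := board.foldl pvRowStep PySem.Dict.empty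
  (moves.foldl pvMoveStepA (dic, [], 0)).2.2

-- ===== PORT B =====
-- B's inner "for row in board2" scan: first row with a non-zero cell in column c is zeroed
def pvFindPop (c : Int) : List (List Int) → Option (Int × List (List Int))
  | [] => none
  | row :: rest =>
    if 0 ≤ c ∧ c < (row.length : Int) ∧ (PySem.List.pyGet? row c).getD 0 ≠ 0 then
      some ((PySem.List.pyGet? row c).getD 0, row.set c.toNat 0 :: rest)
    else (pvFindPop c rest).map (fun p => (p.1, row :: p.2))

-- body of B's "for m in moves" loop; state = (board2, basket, answer)
def pvMoveStepB (st : List (List Int) × List Int × Int) (m : Int) :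
    List (List Int) × List Int × Int :=
  match pvFindPop (m - 1) st.1 with
  | none => st
  | some (v, b2) =>
    if st.2.1 ≠ [] ∧ PySem.List.pyGet? st.2.1 (-1) = some v then
      (b2, st.2.1.dropLast, st.2.2 + 2)
    else (b2, st.2.1 ++ [v], st.2.2)

def solution_alt (board : List (List Int)) (moves : List Int) : Int :=
  let board2 := board.map id   -- [row[:] for row in board]: a copy (lists are immutable here)
  (moves.foldl pvMoveStepB (board2, [], 0)).2.2

-- ===== PRECONDITION & SPEC =====
def Spec_solution (board : List (List Int)) (moves : List Int) (out : Int) : Prop := out = solution_alt board moves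
instance (board : List (List Int)) (moves : List Int) (out : Int) : Decidable (Spec_solution board moves out) := by unfold Spec_solution; infer_instance

-- ===== CLAIM (what is proved, stated in full; the proofs are below) =====
def Claim_equal_solution : Prop := ∀ (board : List (List Int)) (moves : List Int), Dom_solution board moves → Spec_solution board moves (solution board moves)

-- ===== LEMMAS AND PROOFS =====

-- the non-zero entries of column c, top to bottom
def colNZ (c : Int) (b : List (List Int)) : List Int :=
  b.filterMap (fun row =>
    if 0 ≤ c ∧ c < (row.length : Int) ∧ (PySem.List.pyGet? row c).getD 0 ≠ 0 then
      some ((PySem.List.pyGet? row c).getD 0) else none)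

lemma colNZ_cons (c : Int) (row : List Int) (bs : List (List Int)) :
    colNZ c (row :: bs) =
      (if 0 ≤ c ∧ c < (row.length : Int) ∧ (PySem.List.pyGet? row c).getD 0 ≠ 0 then
        [(PySem.List.pyGet? row c).getD 0] else []) ++ colNZ c bs := by
  simp only [colNZ, List.filterMap_cons]
  split_ifs with h <;> simp

lemma rowStep_inner (row : List Int) : ∀ (s : Int) (dic : PySem.Dict Int (List Int)) (i : Int),
    ((PySem.List.enumerate row s).foldl
      (fun d p => if p.2 = 0 then d else d.insert (p.1 + 1) (d.getD (p.1 + 1) [] ++ [p.2])) dic).getD i []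
    = dic.getD i [] ++
      (if 0 ≤ i - 1 - s ∧ i - 1 - s < (row.length : Int) ∧
          (PySem.List.pyGet? row (i - 1 - s)).getD 0 ≠ 0 then
        [(PySem.List.pyGet? row (i - 1 - s)).getD 0] else []) := by
  induction row with
  | nil => intro s dic i; simp [PySem.List.enumerate_nil]; omega
  | cons x xs ih =>
    intro s dic i
    rw [PySem.List.enumerate_cons, List.foldl_cons, ih]
    by_cases hx : x = 0
    · subst hx
      congr 1
      by_cases hi : i = s + 1
      · subst hi
        have h0 : (s : Int) + 1 - 1 - s = 0 := by ring
        rw [h0]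
        simp
      · have hne : i - 1 - s ≠ 0 := by omega
        by_cases hpos : 0 < i - 1 - s
        · have h1 : i - 1 - (s + 1) = (i - 1 - s) - 1 := by ring
          have hget : PySem.List.pyGet? (0 :: xs) (i - 1 - s)
              = PySem.List.pyGet? xs (i - 1 - s - 1) := by
            rw [PySem.List.pyGet?_of_nonneg _ (by omega), PySem.List.pyGet?_of_nonneg _ (by omega)]
            have : (i - 1 - s).toNat = (i - 1 - s - 1).toNat + 1 := by omega
            rw [this]
            simp
          rw [h1, ← hget]
          refine if_congr ?_ rfl rfl
          simp only [List.length_cons, Nat.cast_add, Nat.cast_one]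
          constructor <;> rintro ⟨ha, hb, hcz⟩ <;> exact ⟨by omega, by omega, hcz⟩
        · have : i - 1 - s < 0 := by omega
          have h1 : i - 1 - (s + 1) < 0 := by omega
          rw [if_neg (by omega), if_neg (by omega)]
    · simp only [if_neg hx]
      rw [PySem.Dict.getD_insert]
      by_cases hi : i = s + 1
      · subst hi
        rw [if_pos rfl]
        have h1 : (s : Int) + 1 - 1 - (s + 1) = -1 + 0 - 0 := by ring
        have h2 : (s : Int) + 1 - 1 - s = 0 := by ring
        rw [h1, h2]
        rw [if_neg (by omega)]
        simp [hx]
      · rw [if_neg hi]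
        congr 1
        by_cases hpos : 0 < i - 1 - s
        · have h1 : i - 1 - (s + 1) = (i - 1 - s) - 1 := by ring
          have hget : PySem.List.pyGet? (x :: xs) (i - 1 - s)
              = PySem.List.pyGet? xs (i - 1 - s - 1) := by
            rw [PySem.List.pyGet?_of_nonneg _ (by omega), PySem.List.pyGet?_of_nonneg _ (by omega)]
            have : (i - 1 - s).toNat = (i - 1 - s - 1).toNat + 1 := by omega
            rw [this]
            simp
          rw [h1, ← hget]
          refine if_congr ?_ rfl rfl
          simp only [List.length_cons, Nat.cast_add, Nat.cast_one]
          constructor <;> rintro ⟨ha, hb, hcz⟩ <;> exact ⟨by omega, by omega, hcz⟩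
        · have h0 : i - 1 - s ≠ 0 := by omega
          rw [if_neg (by omega), if_neg (by omega)]

lemma colNZ_nil (c : Int) : colNZ c [] = [] := rfl

lemma rowStep_getD (row : List Int) (dic : PySem.Dict Int (List Int)) (i : Int) :
    (pvRowStep dic row).getD i [] = dic.getD i [] ++ colNZ (i - 1) [row] := by
  unfold pvRowStep
  rw [rowStep_inner row 0 dic i]
  rw [colNZ_cons]
  simp [colNZ]

lemma build_getD (board : List (List Int)) : ∀ (dic : PySem.Dict Int (List Int)) (i : Int),
    (board.foldl pvRowStep dic).getD i [] = dic.getD i [] ++ colNZ (i - 1) board := by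
  induction board with
  | nil => intro dic i; simp [colNZ]
  | cons row bs ih =>
    intro dic i
    rw [List.foldl_cons, ih, rowStep_getD, List.append_assoc, colNZ_cons, colNZ_cons,
      colNZ_nil, List.append_nil]

lemma findPop_spec (c : Int) (b : List (List Int)) :
    (colNZ c b = [] → pvFindPop c b = none) ∧
    (∀ v rest, colNZ c b = v :: rest →
      ∃ b', pvFindPop c b = some (v, b') ∧ ∀ c', colNZ c' b' = if c' = c then rest else colNZ c' b) := by
  induction b with
  | nil => exact ⟨fun _ => rfl, fun v rest h => by simp [colNZ] at h⟩
  | cons row bs ih =>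
    by_cases h : 0 ≤ c ∧ c < (row.length : Int) ∧ (PySem.List.pyGet? row c).getD 0 ≠ 0
    · constructor
      · intro hnil; rw [colNZ_cons, if_pos h] at hnil; simp at hnil
      · intro v rest hcol
        rw [colNZ_cons, if_pos h] at hcol
        simp only [List.cons_append, List.nil_append, List.cons.injEq] at hcol
        obtain ⟨hv, hrest⟩ := hcol
        refine ⟨row.set c.toNat 0 :: bs, ?_, ?_⟩
        · conv_lhs => rw [pvFindPop]
          rw [if_pos h, hv]
        · intro c'
          have hget0 : PySem.List.pyGet? (row.set c.toNat 0) c =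
              some 0 := by
            rw [PySem.List.pyGet?_of_nonneg _ h.1]
            exact List.getElem?_set_self (by omega)
          have hlen : ((row.set c.toNat 0).length : Int) = (row.length : Int) := by simp
          by_cases hc : c' = c
          · subst hc
            rw [if_pos rfl, colNZ_cons]
            rw [if_neg (by rw [hget0]; simp), ← hrest]
            simp
          · rw [if_neg hc, colNZ_cons, colNZ_cons]
            by_cases hc0 : 0 ≤ c'
            · have hgs : PySem.List.pyGet? (row.set c.toNat 0) c' = PySem.List.pyGet? row c' := by
                rw [PySem.List.pyGet?_of_nonneg _ hc0, PySem.List.pyGet?_of_nonneg _ hc0]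
                exact List.getElem?_set_ne (by omega)
              rw [hgs, hlen]
            · rw [if_neg (fun hP => hc0 hP.1), if_neg (fun hP => hc0 hP.1)]
    · have hstep : pvFindPop c (row :: bs) = (pvFindPop c bs).map (fun p => (p.1, row :: p.2)) := by
        conv_lhs => rw [pvFindPop]
        rw [if_neg h]
      have hcol : colNZ c (row :: bs) = colNZ c bs := by rw [colNZ_cons, if_neg h]; simp
      constructor
      · intro hnil; rw [hcol] at hnil; rw [hstep, ih.1 hnil]; rfl
      · intro v rest hc2
        rw [hcol] at hc2
        obtain ⟨b', hb', hall⟩ := ih.2 v rest hc2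
        refine ⟨row :: b', by rw [hstep, hb']; rfl, ?_⟩
        intro c'
        rw [colNZ_cons, hall c', colNZ_cons]
        by_cases hcc : c' = c
        · subst hcc; rw [if_pos rfl, if_pos rfl, if_neg h]; simp
        · rw [if_neg hcc, if_neg hcc]

-- A's basket condition (append, then last two equal) matches B's (top equals the new value)
lemma basket_iff (basket : List Int) (v : Int) :
    (2 ≤ (basket ++ [v]).length ∧
      PySem.List.pyGet? (basket ++ [v]) (-1) = PySem.List.pyGet? (basket ++ [v]) (-2))
    ↔ (basket ≠ [] ∧ PySem.List.pyGet? basket (-1) = some v) := by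
  by_cases hb : basket = []
  · subst hb; simp
  · have hble : 0 < basket.length := List.length_pos_of_ne_nil hb
    have h1 := PySem.List.pyGet?_neg_one_append_singleton basket v
    have h2 : PySem.List.pyGet? (basket ++ [v]) (-2) = basket.getLast? := by
      rw [show (-2 : Int) = -((2 : Nat) : Int) by norm_num]
      rw [PySem.List.pyGet?_neg_natCast _ 2 (by norm_num) (by simp; omega)]
      have hidx : (basket ++ [v]).length - 2 = basket.length - 1 := by simp
      rw [hidx, List.getElem?_append_left (by omega), List.getLast?_eq_getElem?]
    have hB := PySem.List.pyGet?_neg_one basket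
    rw [h1, h2, hB]
    have hlen : 2 ≤ (basket ++ [v]).length := by simp; omega
    constructor
    · rintro ⟨_, he⟩; exact ⟨hb, he.symm⟩
    · rintro ⟨_, he⟩; exact ⟨hlen, he.symm⟩

lemma step_rel (dic : PySem.Dict Int (List Int)) (b2 : List (List Int))
    (basket : List Int) (ans : Int) (m : Int)
    (h : ∀ i, dic.getD i [] = colNZ (i - 1) b2) :
    (∀ i, (pvMoveStepA (dic, basket, ans) m).1.getD i []
        = colNZ (i - 1) (pvMoveStepB (b2, basket, ans) m).1) ∧
    (pvMoveStepA (dic, basket, ans) m).2 = (pvMoveStepB (b2, basket, ans) m).2 := by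
  have hm := h m
  rcases hcol : colNZ (m - 1) b2 with _ | ⟨v, rest⟩
  · have hA : dic.getD m [] = [] := by rw [hm, hcol]
    have hB : pvFindPop (m - 1) b2 = none := (findPop_spec (m - 1) b2).1 hcol
    unfold pvMoveStepA pvMoveStepB
    simp only [hA, hB]
    exact ⟨h, by trivial⟩
  · obtain ⟨b', hb', hall⟩ := (findPop_spec (m - 1) b2).2 v rest hcol
    have hA : dic.getD m [] = v :: rest := by rw [hm, hcol]
    unfold pvMoveStepA pvMoveStepB
    simp only [hA, hb']
    have hiff := basket_iff basket v
    have hdrop : (basket ++ [v]).dropLast = basket := List.dropLast_concat ..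
    constructor
    · intro i
      have hgi : (dic.insert m rest).getD i [] = if i = m then rest else dic.getD i [] :=
        PySem.Dict.getD_insert ..
      have hci : colNZ (i - 1) b' = if i - 1 = m - 1 then rest else colNZ (i - 1) b2 :=
        hall (i - 1)
      split_ifs <;>
        · simp only [hgi, hci, h i]
          by_cases hi : i = m
          · rw [if_pos hi, if_pos (by omega)]
          · rw [if_neg hi, if_neg (by omega)]
    · split_ifs with hcA hcB hcB
      · simp [hdrop]
      · exact absurd (hiff.mp hcA) hcB
      · exact absurd (hiff.mpr hcB) hcA
      · rfl

lemma fold_rel (moves : List Int) :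
    ∀ (dic : PySem.Dict Int (List Int)) (b2 : List (List Int)) (basket : List Int) (ans : Int),
    (∀ i, dic.getD i [] = colNZ (i - 1) b2) →
    (moves.foldl pvMoveStepA (dic, basket, ans)).2 = (moves.foldl pvMoveStepB (b2, basket, ans)).2 := by
  induction moves with
  | nil => intro _ _ _ _ _; rfl
  | cons m ms ih =>
    intro dic b2 basket ans h
    obtain ⟨h1, h2⟩ := step_rel dic b2 basket ans m h
    rw [List.foldl_cons, List.foldl_cons]
    rcases hA : pvMoveStepA (dic, basket, ans) m with ⟨dic2, bk1, ans1⟩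
    rcases hB : pvMoveStepB (b2, basket, ans) m with ⟨b22, bk2, ans2⟩
    rw [hA, hB] at h1 h2
    simp only [Prod.mk.injEq] at h2
    rw [h2.1, h2.2]
    exact ih dic2 b22 bk2 ans2 h1

-- ===== VERDICT (by name: the statement is the Claim_ definition above) =====
theorem solution_spec : Claim_equal_solution := by
  intro board moves _
  unfold Spec_solution solution solution_alt
  simp only [List.map_id]
  exact congrArg Prod.snd (fold_rel moves _ board [] 0 (fun i => by
    rw [build_getD board PySem.Dict.empty i]; simp [PySem.Dict.getD_empty]))
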